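-- pv_equiv track=rewrite | github.com/joserafael1990/medical-records | backend/crud/base.py | parse_phone_with_country_code
-- ===== SOURCE A (Python) =====
-- def parse_phone_with_country_code(phone: str) -> dict:
--     """
--     Parse a phone number to extract country code and number
--     Returns: {country_code: str, number: str}
--     """
--     if not phone:
--         return {'country_code': '+52', 'number': ''}
--
--     phone = phone.strip()
--
--     # Common country codes (sorted by length descending to match longest first)
--     country_codes = [
--         '+593', '+595', '+598', '+591', '+592', '+597', '+594', '+596',
--         '+502', '+503', '+504', '+505', '+506', '+507', '+509', '+501',
--         '+971', '+972', '+973', '+974', '+975', '+976', '+977', '+992',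
--         '+993', '+994', '+995', '+996', '+998',
--         '+52', '+54', '+55', '+56', '+57', '+58',
--         '+1', '+7', '+20', '+27', '+30', '+31', '+32', '+33', '+34',
--         '+36', '+39', '+40', '+41', '+43', '+44', '+45', '+46', '+47',
--         '+48', '+49', '+51', '+60', '+61', '+62', '+63', '+64', '+65',
--         '+66', '+81', '+82', '+84', '+86', '+90', '+91', '+92', '+93',
--         '+94', '+95', '+98'
--     ]
--
--     # Sort by length descending to match longest codes first
--     country_codes.sort(key=len, reverse=True)
--
--     for code in country_codes:
--         if phone.startswith(code):
--             return {
--                 'country_code': code,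
--                 'number': phone[len(code):].strip()
--             }
--
--     # Default to Mexico if no code found
--     return {'country_code': '+52', 'number': phone}
-- ===== SOURCE B (Python) =====
-- _CODES = [
--     '+593', '+595', '+598', '+591', '+592', '+597', '+594', '+596',
--     '+502', '+503', '+504', '+505', '+506', '+507', '+509', '+501',
--     '+971', '+972', '+973', '+974', '+975', '+976', '+977', '+992',
--     '+993', '+994', '+995', '+996', '+998',
--     '+52', '+54', '+55', '+56', '+57', '+58',
--     '+1', '+7', '+20', '+27', '+30', '+31', '+32', '+33', '+34',
--     '+36', '+39', '+40', '+41', '+43', '+44', '+45', '+46', '+47',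
--     '+48', '+49', '+51', '+60', '+61', '+62', '+63', '+64', '+65',
--     '+66', '+81', '+82', '+84', '+86', '+90', '+91', '+92', '+93',
--     '+94', '+95', '+98'
-- ]
--
-- # One frozenset of codes per code length, built once at import time.
-- _BY_LEN = {L: frozenset(c for c in _CODES if len(c) == L) for L in (4, 3, 2)}
--
--
-- def parse_phone_with_country_code(phone: str) -> dict:
--     if not phone:
--         return {'country_code': '+52', 'number': ''}
--     phone = phone.strip()
--     for L in (4, 3, 2):
--         cand = phone[:L]
--         if cand in _BY_LEN[L]:
--             return {'country_code': cand, 'number': phone[L:].strip()}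
--     return {'country_code': '+52', 'number': phone}
-- ===== Notes on version B (the rewrite author's own statement) =====
-- stated objective: idiomatic
-- what changed: Replaces the per-call sort and sequential startswith scan over all ~73 codes with per-length frozensets built once at import: the function loops over the three code lengths (4,3,2) and does one membership test per length.
import Mathlib
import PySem

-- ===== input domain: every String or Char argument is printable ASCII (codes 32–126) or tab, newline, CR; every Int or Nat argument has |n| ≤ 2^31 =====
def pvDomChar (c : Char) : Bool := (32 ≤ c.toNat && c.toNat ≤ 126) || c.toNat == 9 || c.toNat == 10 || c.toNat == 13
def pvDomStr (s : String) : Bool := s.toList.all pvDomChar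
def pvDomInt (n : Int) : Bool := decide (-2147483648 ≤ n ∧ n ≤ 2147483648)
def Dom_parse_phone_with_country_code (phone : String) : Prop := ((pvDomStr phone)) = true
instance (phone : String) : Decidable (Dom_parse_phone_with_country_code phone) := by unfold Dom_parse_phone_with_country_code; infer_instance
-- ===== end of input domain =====

-- B replaces A's per-call sort and sequential startswith scan over all ~73 codes by
-- per-length code sets built once and one membership test per code length (4, 3, 2).

-- ===== PORT A =====
def pvCodesA : List String := [
    "+593", "+595", "+598", "+591", "+592", "+597", "+594", "+596",
    "+502", "+503", "+504", "+505", "+506", "+507", "+509", "+501",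
    "+971", "+972", "+973", "+974", "+975", "+976", "+977", "+992",
    "+993", "+994", "+995", "+996", "+998",
    "+52", "+54", "+55", "+56", "+57", "+58",
    "+1", "+7", "+20", "+27", "+30", "+31", "+32", "+33", "+34",
    "+36", "+39", "+40", "+41", "+43", "+44", "+45", "+46", "+47",
    "+48", "+49", "+51", "+60", "+61", "+62", "+63", "+64", "+65",
    "+66", "+81", "+82", "+84", "+86", "+90", "+91", "+92", "+93",
    "+94", "+95", "+98"]

def parse_phone_with_country_code (phone : String) : List (String × String) :=
  if phone = "" then [("country_code", "+52"), ("number", "")]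
  else
    let p := PySem.Str.strip phone
    let codes := PySem.List.sorted pvCodesA (fun c => PySem.Str.len c) true
    match codes.find? (fun c => PySem.Str.startswith p c) with
    | some code =>
        [("country_code", code),
         ("number", PySem.Str.strip (PySem.Str.slice p (some ((PySem.Str.len code : Int))) none))]
    | none => [("country_code", "+52"), ("number", p)]

-- ===== PORT B =====
def pvCodesB : List String := pvCodesA

def pvByLen (L : Nat) : PySem.Set String :=
  PySem.Set.ofList (pvCodesB.filter (fun c => PySem.Str.len c == L))

def pvAltLoop (p : String) : List Nat → List (String × String)
  | [] => [("country_code", "+52"), ("number", p)]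
  | L :: rest =>
      let cand := PySem.Str.slice p none (some (L : Int))
      if PySem.Set.contains (pvByLen L) cand then
        [("country_code", cand),
         ("number", PySem.Str.strip (PySem.Str.slice p (some (L : Int)) none))]
      else pvAltLoop p rest

def parse_phone_with_country_code_alt (phone : String) : List (String × String) :=
  if phone = "" then [("country_code", "+52"), ("number", "")]
  else pvAltLoop (PySem.Str.strip phone) [4, 3, 2]

-- ===== PRECONDITION & SPEC =====
def Spec_parse_phone_with_country_code (phone : String) (out : List (String × String)) : Prop := out = parse_phone_with_country_code_alt phone
instance (phone : String) (out : List (String × String)) : Decidable (Spec_parse_phone_with_country_code phone out) := by unfold Spec_parse_phone_with_country_code; infer_instance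

-- ===== CLAIM (what is proved, stated in full; the proofs are below) =====
def Claim_equal_parse_phone_with_country_code : Prop := ∀ (phone : String), Dom_parse_phone_with_country_code phone → Spec_parse_phone_with_country_code phone (parse_phone_with_country_code phone)

-- ===== LEMMAS AND PROOFS =====

-- the three length groups, in A's original order (stable sort keeps in-group order)
def pvG (L : Nat) : List String := pvCodesA.filter (fun c => PySem.Str.len c == L)

theorem pvSorted_eq : PySem.List.sorted pvCodesA (fun c => PySem.Str.len c) true
    = pvG 4 ++ pvG 3 ++ pvG 2 := by decide

-- on a group whose codes all have length L, the first startswith match is exactly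
-- the L-prefix of p when it is in the group
theorem pvFind_group (p : String) (L : Nat) (g : List String)
    (h : ∀ c ∈ g, c.toList.length = L) :
    g.find? (fun c => PySem.Str.startswith p c) =
      (if PySem.Str.slice p none (some (L : Int)) ∈ g
       then some (PySem.Str.slice p none (some (L : Int))) else none) := by
  induction g with
  | nil => simp
  | cons c g ih =>
    have hc : c.toList.length = L := h c (by simp)
    have hstep : PySem.Str.startswith p c = true ↔
        PySem.Str.slice p none (some (L : Int)) = c := by
      have hsw : PySem.Str.startswith p c = true ↔ c.toList <+: p.toList := by
        rw [PySem.Str.startswith_eq]; exact PySem.Chars.startswith_iff _ _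
      have hslice : (PySem.Str.slice p none (some (L : Int))).toList = p.toList.take L := by
        simp [PySem.Str.toList_slice, PySem.List.slice_to_natCast]
      constructor
      · intro hs
        apply String.ext
        rw [hslice]
        have := (List.prefix_iff_eq_take.mp (hsw.mp hs))
        rw [hc] at this; exact this.symm
      · intro hs
        apply hsw.mpr
        apply List.prefix_iff_eq_take.mpr
        rw [hc, ← hslice, hs]
    by_cases hcand : PySem.Str.slice p none (some (L : Int)) = c
    · have hb : PySem.Str.startswith p c = true := hstep.mpr hcand
      rw [List.find?_cons_of_pos hb, if_pos (by simp [hcand]), hcand]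
    · have hb : PySem.Str.startswith p c = false :=
        Bool.eq_false_iff.mpr (fun hs => hcand (hstep.mp hs))
      rw [List.find?_cons_of_neg (by simpa using hb), ih (fun x hx => h x (by simp [hx]))]
      by_cases hm : PySem.Str.slice p none (some (L : Int)) ∈ g
      · rw [if_pos hm, if_pos (by simp [hm])]
      · rw [if_neg hm, if_neg (by simp [hm, hcand])]

theorem pvContains_iff (L : Nat) (x : String) :
    PySem.Set.contains (pvByLen L) x = true ↔ x ∈ pvG L := by
  unfold pvByLen pvCodesB
  unfold PySem.Set.contains
  simp only [PySem.Set.mem_ofList, List.contains_iff_mem]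
  rfl

theorem pvG_len (L : Nat) : ∀ c ∈ pvG L, c.toList.length = L := by
  intro c hc
  unfold pvG at hc
  have := (List.mem_filter.mp hc).2
  simpa [PySem.Str.len_eq, PySem.Chars.len_eq] using this

theorem pvAltLoop_cons (p : String) (L : Nat) (rest : List Nat) :
    pvAltLoop p (L :: rest) =
      if PySem.Set.contains (pvByLen L) (PySem.Str.slice p none (some (L : Int))) then
        [("country_code", PySem.Str.slice p none (some (L : Int))),
         ("number", PySem.Str.strip (PySem.Str.slice p (some (L : Int)) none))]
      else pvAltLoop p rest := rfl

-- one length-step: A's find? over the group gL against B's set test, given the rest agrees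
theorem pvStep (p : String) (L : Nat) (rest : List Nat) (tail : Option String)
    (hrest : (match tail with
      | some code => [("country_code", code),
          ("number", PySem.Str.strip (PySem.Str.slice p (some ((PySem.Str.len code : Int))) none))]
      | none => [("country_code", "+52"), ("number", p)]) = pvAltLoop p rest) :
    (match (List.find? (fun c => PySem.Str.startswith p c) (pvG L)).or tail with
      | some code => [("country_code", code),
          ("number", PySem.Str.strip (PySem.Str.slice p (some ((PySem.Str.len code : Int))) none))]
      | none => [("country_code", "+52"), ("number", p)]) = pvAltLoop p (L :: rest) := by
  rw [pvFind_group p L _ (pvG_len L), pvAltLoop_cons]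
  by_cases hm : PySem.Str.slice p none (some (L : Int)) ∈ pvG L
  · have hlen : (PySem.Str.len (PySem.Str.slice p none (some (L : Int))) : Int) = (L : Int) := by
      have h1 := pvG_len L _ hm
      simp only [PySem.Str.len_eq, h1]
    rw [if_pos hm, if_pos ((pvContains_iff L _).mpr hm),
      show (some (PySem.Str.slice p none (some (L : Int)))).or tail
          = some (PySem.Str.slice p none (some (L : Int))) from rfl]
    simp only [hlen]
  · rw [if_neg hm,
      if_neg (fun h => hm ((pvContains_iff L _).mp h))]
    simpa using hrest

-- ===== VERDICT (by name: the statement is the Claim_ definition above) =====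
set_option maxHeartbeats 1000000 in
theorem parse_phone_with_country_code_spec : Claim_equal_parse_phone_with_country_code := by
  intro phone _
  unfold Spec_parse_phone_with_country_code parse_phone_with_country_code parse_phone_with_country_code_alt
  by_cases h0 : phone = ""
  · simp [h0]
  · rw [if_neg h0, if_neg h0]
    set p := PySem.Str.strip phone with hp
    simp only [pvSorted_eq, List.append_assoc, List.find?_append]
    have h2 := pvStep p 2 [] none rfl
    rw [Option.or_none] at h2
    exact pvStep p 4 [3, 2] _ (pvStep p 3 [2] _ h2)
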